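-- pv_equiv track=rewrite | github.com/Wu-GQ/PythonDemos | LeetCode/LeetCode_String_2.py | calculate
-- ===== SOURCE A (Python) =====
-- def calculate(s: str) -> int:
--     """
--     LCP 17. 速算机器人
--     :see
--     """
--     x, y = 1, 0
--     for i in s:
--         if i == 'A':
--             x = 2 * x + y
--         else:
--             y = 2 * y + x
--     return x + y
-- ===== SOURCE B (Python) =====
-- def calculate(s: str) -> int:
--     # x+y doubles on every character regardless of branch, so the result is 2**len(s).
--     return 1 << len(s)
-- ===== Notes on version B (the rewrite author's own statement) =====
-- stated objective: simpler
-- what changed: Replaced the per-character state simulation with the closed form 1 << len(s), since x+y doubles on every character regardless of branch.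
import Mathlib
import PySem

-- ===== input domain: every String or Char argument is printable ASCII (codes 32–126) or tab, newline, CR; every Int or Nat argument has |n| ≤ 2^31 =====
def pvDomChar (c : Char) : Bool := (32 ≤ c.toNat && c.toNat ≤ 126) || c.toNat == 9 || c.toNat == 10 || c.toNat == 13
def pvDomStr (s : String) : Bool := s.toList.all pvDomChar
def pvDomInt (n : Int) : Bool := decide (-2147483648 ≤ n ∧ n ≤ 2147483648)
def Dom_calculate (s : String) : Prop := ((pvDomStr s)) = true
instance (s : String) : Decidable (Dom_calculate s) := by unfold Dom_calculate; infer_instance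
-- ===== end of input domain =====

-- B replaces A's per-character (x, y) simulation with the closed form 2^len(s): x+y doubles on every character.

-- ===== PORT A =====
def calculate (s : String) : Int :=
  let p := s.toList.foldl
    (fun (xy : Int × Int) (i : Char) =>
      if i = 'A' then (2 * xy.1 + xy.2, xy.2) else (xy.1, 2 * xy.2 + xy.1))
    (1, 0)
  p.1 + p.2

-- ===== PORT B =====
def calculate_alt (s : String) : Int := 2 ^ s.toList.length

-- ===== PRECONDITION & SPEC =====
def Spec_calculate (s : String) (out : Int) : Prop := out = calculate_alt s
instance (s : String) (out : Int) : Decidable (Spec_calculate s out) := by unfold Spec_calculate; infer_instance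

-- ===== CLAIM (what is proved, stated in full; the proofs are below) =====
def Claim_equal_calculate : Prop := ∀ (s : String), Dom_calculate s → Spec_calculate s (calculate s)

-- ===== LEMMAS AND PROOFS =====
theorem calculate_fold_sum (l : List Char) (x y : Int) :
    (l.foldl (fun (xy : Int × Int) (i : Char) =>
      if i = 'A' then (2 * xy.1 + xy.2, xy.2) else (xy.1, 2 * xy.2 + xy.1)) (x, y)).1 +
    (l.foldl (fun (xy : Int × Int) (i : Char) =>
      if i = 'A' then (2 * xy.1 + xy.2, xy.2) else (xy.1, 2 * xy.2 + xy.1)) (x, y)).2 =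
    2 ^ l.length * (x + y) := by
  induction l generalizing x y with
  | nil => simp
  | cons c t ih =>
    simp only [List.foldl_cons, List.length_cons]
    split_ifs <;> rw [ih] <;> ring

-- ===== VERDICT (by name: the statement is the Claim_ definition above) =====
theorem calculate_spec : Claim_equal_calculate := by
  intro s _
  show _ = _
  simp [calculate, calculate_alt, calculate_fold_sum]
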